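-- pv_equiv track=rewrite | github.com/run-rasztabiga-me/run | main_langchain.py | normalize_namespace
-- ===== SOURCE A (Python) =====
-- def normalize_namespace(name: str) -> str:
--   """
--   Normalize namespace name to comply with Kubernetes naming rules.
--   Namespace must be a lowercase RFC 1123 label:
--   - must consist of lower case alphanumeric characters or '-'
--   - must start and end with an alphanumeric character
--   - regex: [a-z0-9]([-a-z0-9]*[a-z0-9])?
--
--   Args:
--       name: Name to normalize
--
--   Returns:
--       str: Normalized name
--   """
--   # Replace any non-alphanumeric characters with '-'
--   normalized = ''.join(c if c.isalnum() else '-' for c in name.lower())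
--
--   # Remove leading/trailing hyphens
--   normalized = normalized.strip('-')
--
--   # Replace multiple consecutive hyphens with a single one
--   normalized = '-'.join(filter(None, normalized.split('-')))
--
--   # Ensure the name starts and ends with an alphanumeric character
--   if not normalized[0].isalnum():
--     normalized = 'a' + normalized
--   if not normalized[-1].isalnum():
--     normalized = normalized + 'a'
--
--   return normalized
-- ===== SOURCE B (Python) =====
-- def normalize_namespace(name: str) -> str:
--     out = []
--     pending = False
--     for c in name.lower():
--         if c.isalnum():
--             if pending:
--                 out.append('-')
--             out.append(c)
--             pending = False
--         else:
--             pending = pending or bool(out)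
--     normalized = ''.join(out)
--     if not normalized[0].isalnum():
--         normalized = 'a' + normalized
--     if not normalized[-1].isalnum():
--         normalized = normalized + 'a'
--     return normalized
-- ===== Notes on version B (the rewrite author's own statement) =====
-- stated objective: simpler
-- what changed: Replaces A's four-stage string pipeline (replace non-alnum chars with hyphens, strip hyphens, split on hyphen, filter empties, rejoin) with a single explicit pass over name.lower() keeping a pending-separator flag that emits one hyphen between alnum runs; the two boundary guards are kept, so inputs with no alphanumeric character still raise IndexError as in A.
import Mathlib
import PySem

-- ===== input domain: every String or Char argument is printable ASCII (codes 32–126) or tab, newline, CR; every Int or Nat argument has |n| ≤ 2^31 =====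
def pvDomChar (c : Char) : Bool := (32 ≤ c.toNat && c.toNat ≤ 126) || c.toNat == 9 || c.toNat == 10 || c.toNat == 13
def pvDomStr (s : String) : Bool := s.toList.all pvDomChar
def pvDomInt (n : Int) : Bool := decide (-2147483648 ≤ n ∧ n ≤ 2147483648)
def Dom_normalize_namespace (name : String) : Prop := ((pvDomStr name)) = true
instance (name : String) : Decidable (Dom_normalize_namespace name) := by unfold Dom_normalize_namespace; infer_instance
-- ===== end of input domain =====

-- B replaces A's four-stage pipeline (replace, strip, split/filter/join) with one pass over the
-- lowered characters keeping a pending-separator flag; the boundary guards are kept (objective: simpler).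

-- ===== PORT A =====
def normalize_namespace (name : String) : String :=
  let lowered := (PySem.Str.lower name).toList
  -- ''.join(c if c.isalnum() else '-' for c in name.lower())
  let normalized1 := PySem.Chars.join [] (lowered.map (fun c => if PySem.Chars.isalnum c then [c] else ['-']))
  -- normalized.strip('-')
  let normalized2 := PySem.Chars.stripChars normalized1 ['-']
  -- '-'.join(filter(None, normalized.split('-')))
  let normalized3 := PySem.Chars.join ['-'] ((PySem.Chars.splitOn normalized2 ['-']).filter (fun part => !part.isEmpty))
  -- if not normalized[0].isalnum(): normalized = 'a' + normalized
  let normalized4 :=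
    match PySem.List.pyGet? normalized3 0 with
    | none => normalized3   -- Python raises IndexError here (empty string); excluded by Pre_
    | some c => if !(PySem.Chars.isalnum c) then 'a' :: normalized3 else normalized3
  -- if not normalized[-1].isalnum(): normalized = normalized + 'a'
  let normalized5 :=
    match PySem.List.pyGet? normalized4 (-1) with
    | none => normalized4
    | some c => if !(PySem.Chars.isalnum c) then normalized4 ++ ['a'] else normalized4
  String.ofList normalized5

-- ===== PORT B =====
def normalize_namespace_alt (name : String) : String :=
  let final := ((PySem.Str.lower name).toList).foldl
    (fun (st : List Char × Bool) c =>
      if PySem.Chars.isalnum c then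
        (st.1 ++ (if st.2 then ['-', c] else [c]), false)
      else
        (st.1, st.2 || !st.1.isEmpty))
    ([], false)
  let normalized := final.1
  -- if not normalized[0].isalnum(): normalized = 'a' + normalized
  let normalized1 :=
    match PySem.List.pyGet? normalized 0 with
    | none => normalized   -- Python raises IndexError here (empty string); excluded by Pre_
    | some c => if !(PySem.Chars.isalnum c) then 'a' :: normalized else normalized
  -- if not normalized[-1].isalnum(): normalized = normalized + 'a'
  let normalized2 :=
    match PySem.List.pyGet? normalized1 (-1) with
    | none => normalized1
    | some c => if !(PySem.Chars.isalnum c) then normalized1 ++ ['a'] else normalized1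
  String.ofList normalized2

-- ===== PRECONDITION & SPEC =====
-- Pre_ excludes exactly the strings with no alphanumeric character: there both programs' built
-- string is empty and normalized[0] raises IndexError in A and in B alike.
def Pre_normalize_namespace (name : String) : Prop :=
  (name.toList.any (fun c => PySem.Chars.isalnum (PySem.Chars.lowerChar c))) = true
instance (name : String) : Decidable (Pre_normalize_namespace name) := by
  unfold Pre_normalize_namespace; infer_instance
def pvWitness_normalize_namespace : String := "My App_v2!"

def Spec_normalize_namespace (name : String) (out : String) : Prop := out = normalize_namespace_alt name
instance (name : String) (out : String) : Decidable (Spec_normalize_namespace name out) := by unfold Spec_normalize_namespace; infer_instance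

-- ===== CLAIM (what is proved, stated in full; the proofs are below) =====
def Claim_equal_normalize_namespace : Prop := ∀ (name : String), Dom_normalize_namespace name → Pre_normalize_namespace name → Spec_normalize_namespace name (normalize_namespace name)

-- ===== LEMMAS AND PROOFS =====

-- canonical result of the normalization, as a recursion over the raw (lowered) characters:
-- canF sep l = continuation when output so far is nonempty and sep records a pending separator;
-- canE l = result when output so far is empty.
def canF : Bool → List Char → List Char
  | _, [] => []
  | sep, c :: t =>
    if PySem.Chars.isalnum c then
      (if sep then '-' :: c :: canF false t else c :: canF false t)
    else canF true t

def canE : List Char → List Char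
  | [] => []
  | c :: t => if PySem.Chars.isalnum c then c :: canF false t else canE t

-- A's first stage, per character
def phi (c : Char) : Char := if PySem.Chars.isalnum c then c else '-'

-- split on '-' (single-char separator), headI/tail form; always nonempty
def split1 : List Char → List (List Char)
  | [] => [[]]
  | c :: t => if c = '-' then [] :: split1 t else (c :: (split1 t).headI) :: (split1 t).tail

def Flt (L : List (List Char)) : List (List Char) := L.filter (fun part => !part.isEmpty)

def tailExpr (L : List (List Char)) : List Char :=
  if Flt L = [] then [] else '-' :: List.intercalate ['-'] (Flt L)

lemma split1_ne_nil (l : List Char) : split1 l ≠ [] := by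
  cases l with
  | nil => simp [split1]
  | cons c t => by_cases h : c = '-' <;> simp [split1, h]

lemma headI_cons_tail {α : Type} [Inhabited α] (l : List α) (h : l ≠ []) :
    l.headI :: l.tail = l := by
  cases l with
  | nil => exact absurd rfl h
  | cons a t => rfl

lemma ical_cons (x : List Char) (xs : List (List Char)) :
    List.intercalate ['-'] (x :: xs)
      = x ++ (if xs = [] then [] else '-' :: List.intercalate ['-'] xs) := by
  cases xs with
  | nil => simp [List.intercalate]
  | cons y r => simp [List.intercalate, List.intersperse]

lemma go1 (fuel : Nat) (l cur : List Char) (acc : List (List Char)) (h : l.length < fuel) :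
    PySem.Chars.splitOn.go ['-'] fuel l cur acc
      = acc.reverse ++ (cur.reverse ++ (split1 l).headI) :: (split1 l).tail := by
  induction fuel generalizing l cur acc with
  | zero => omega
  | succ f ih =>
    cases l with
    | nil => simp [PySem.Chars.splitOn.go.eq_def, split1]
    | cons c rest =>
      by_cases hc : c = '-'
      · subst hc
        rw [show PySem.Chars.splitOn.go ['-'] (f+1) ('-' :: rest) cur acc
              = PySem.Chars.splitOn.go ['-'] f rest [] (cur.reverse :: acc) by
            conv_lhs => rw [PySem.Chars.splitOn.go.eq_def]
            simp [List.isPrefixOf]]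
        rw [ih rest [] (cur.reverse :: acc) (by simpa using Nat.lt_of_succ_lt_succ h)]
        simp [split1, headI_cons_tail _ (split1_ne_nil rest)]
      · rw [show PySem.Chars.splitOn.go ['-'] (f+1) (c :: rest) cur acc
              = PySem.Chars.splitOn.go ['-'] f rest (c :: cur) acc by
            conv_lhs => rw [PySem.Chars.splitOn.go.eq_def]
            simp only [List.isPrefixOf, Bool.and_true]
            rw [if_neg (by simp [beq_iff_eq]; exact fun h => hc h.symm)]]
        rw [ih rest (c :: cur) acc (by simpa using Nat.lt_of_succ_lt_succ h)]
        simp [split1, hc]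

lemma splitOn_dash (s : List Char) : PySem.Chars.splitOn s ['-'] = split1 s := by
  unfold PySem.Chars.splitOn
  rw [go1 (s.length + 1) s [] [] (by omega)]
  simp [headI_cons_tail _ (split1_ne_nil s)]

lemma split1_append_dash (xs : List Char) : split1 (xs ++ ['-']) = split1 xs ++ [[]] := by
  induction xs with
  | nil => simp [split1]
  | cons c t ih =>
    by_cases hc : c = '-'
    · simp [split1, hc, ih]
    · cases hsp : split1 t with
      | nil => exact absurd hsp (split1_ne_nil t)
      | cons hd r =>
        simp [split1, hc, ih, hsp]

lemma Flt_cons_nil (L : List (List Char)) : Flt ([] :: L) = Flt L := by simp [Flt]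

lemma Flt_split1_dropWhile (xs : List Char) :
    Flt (split1 (xs.dropWhile (fun c => List.contains ['-'] c))) = Flt (split1 xs) := by
  induction xs with
  | nil => rfl
  | cons c t ih =>
    by_cases hc : c = '-'
    · subst hc
      rw [show List.dropWhile (fun c => List.contains ['-'] c) ('-' :: t)
            = List.dropWhile (fun c => List.contains ['-'] c) t by simp]
      rw [ih, show split1 ('-' :: t) = [] :: split1 t by simp [split1], Flt_cons_nil]
    · rw [show List.dropWhile (fun c => List.contains ['-'] c) (c :: t) = c :: t by
        simp [List.dropWhile, hc]]

lemma Flt_split1_rdrop (r : List Char) :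
    Flt (split1 (r.dropWhile (fun c => List.contains ['-'] c)).reverse)
      = Flt (split1 r.reverse) := by
  induction r with
  | nil => rfl
  | cons c t ih =>
    by_cases hc : c = '-'
    · subst hc
      rw [show List.dropWhile (fun c => List.contains ['-'] c) ('-' :: t)
            = List.dropWhile (fun c => List.contains ['-'] c) t by simp]
      rw [ih]
      rw [show ('-' :: t).reverse = t.reverse ++ ['-'] by simp]
      rw [split1_append_dash]
      simp [Flt, List.filter_append]
    · rw [show List.dropWhile (fun c => List.contains ['-'] c) (c :: t) = c :: t by
        simp [List.dropWhile, hc]]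

lemma Flt_split1_strip (s : List Char) :
    Flt (split1 (PySem.Chars.stripChars s ['-'])) = Flt (split1 s) := by
  unfold PySem.Chars.stripChars
  rw [Flt_split1_rdrop ((s.dropWhile (fun c => List.contains ['-'] c)).reverse)]
  rw [List.reverse_reverse]
  exact Flt_split1_dropWhile s

lemma phi_ne_dash {c : Char} (h : PySem.Chars.isalnum c = true) : phi c ≠ '-' := by
  have : c ≠ '-' := by
    intro hc; subst hc; exact absurd h (by decide)
  simpa [phi, h]

lemma grand (l : List Char) :
    canE l = List.intercalate ['-'] (Flt (split1 (l.map phi)))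
    ∧ canF true l = tailExpr (split1 (l.map phi))
    ∧ canF false l = (split1 (l.map phi)).headI ++ tailExpr ((split1 (l.map phi)).tail) := by
  induction l with
  | nil => refine ⟨?_, ?_, ?_⟩ <;> simp [canE, canF, split1, Flt, tailExpr, List.intercalate]
  | cons c t ih =>
    obtain ⟨ih1, ih2, ih3⟩ := ih
    by_cases hal : PySem.Chars.isalnum c = true
    · have hphic : phi c = c := by simp [phi, hal]
      have hcd : phi c ≠ '-' := phi_ne_dash hal
      have hS : split1 ((c :: t).map phi)
          = (phi c :: (split1 (t.map phi)).headI) :: (split1 (t.map phi)).tail := by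
        simp [split1, hcd]
      have hne : (phi c :: (split1 (t.map phi)).headI) ≠ [] := by simp
      have hFlt : Flt (split1 ((c :: t).map phi))
          = (phi c :: (split1 (t.map phi)).headI) :: Flt ((split1 (t.map phi)).tail) := by
        rw [hS]; simp [Flt]
      refine ⟨?_, ?_, ?_⟩
      · rw [canE, if_pos hal, hFlt, ical_cons, ih3, hphic]
        by_cases hF : Flt ((split1 (t.map phi)).tail) = [] <;>
          simp [tailExpr, hF]
      · rw [show canF true (c :: t) = '-' :: c :: canF false t by simp [canF, hal]]
        rw [tailExpr, hFlt, if_neg (by simp), ical_cons, ih3, hphic]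
        by_cases hF : Flt ((split1 (t.map phi)).tail) = [] <;>
          simp [tailExpr, hF]
      · rw [show canF false (c :: t) = c :: canF false t by simp [canF, hal]]
        rw [hS, ih3, hphic]
        simp
    · have hphic : phi c = '-' := by simp [phi, hal]
      have hS : split1 ((c :: t).map phi) = [] :: split1 (t.map phi) := by
        simp [split1, hphic]
      refine ⟨?_, ?_, ?_⟩
      · rw [show canE (c :: t) = canE t by simp [canE, hal], ih1, hS, Flt_cons_nil]
      · rw [show canF true (c :: t) = canF true t by simp [canF, hal], ih2, hS]
        simp [tailExpr, Flt_cons_nil]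
      · rw [show canF false (c :: t) = canF true t by simp [canF, hal], ih2, hS]
        simp

-- A's stage 1 is map phi
lemma join_map_phi (l : List Char) :
    PySem.Chars.join [] (l.map (fun c => if PySem.Chars.isalnum c then [c] else ['-']))
      = l.map phi := by
  have : (fun c => if PySem.Chars.isalnum c then [c] else ['-'])
      = (fun c : Char => [c]) ∘ phi := by
    funext c; by_cases h : PySem.Chars.isalnum c = true <;> simp [phi, h]
  rw [this, ← List.map_map]
  exact PySem.Chars.join_nil_singletons (l.map phi)

-- shape facts about the canonical result
lemma canE_cases (l : List Char) :
    canE l = [] ∨ ∃ c t, canE l = c :: t ∧ PySem.Chars.isalnum c = true := by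
  induction l with
  | nil => exact Or.inl rfl
  | cons c t ih =>
    by_cases h : PySem.Chars.isalnum c = true
    · exact Or.inr ⟨c, canF false t, by simp [canE, h]⟩
    · simpa [canE, h] using ih

lemma canF_last (l : List Char) :
    ∀ sep, canF sep l = [] ∨ ∃ m x, canF sep l = m ++ [x] ∧ PySem.Chars.isalnum x = true := by
  induction l with
  | nil => intro sep; exact Or.inl rfl
  | cons c t ih =>
    intro sep
    by_cases h : PySem.Chars.isalnum c = true
    · rcases ih false with h0 | ⟨m, x, hm, hx⟩
      · refine Or.inr ⟨(if sep then ['-'] else []), c, ?_, h⟩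
        by_cases hs : sep <;> simp [canF, h, hs, h0]
      · refine Or.inr ⟨(if sep then ['-', c] else [c]) ++ m, x, ?_, hx⟩
        by_cases hs : sep <;> simp [canF, h, hs, hm]
    · simpa [canF, h] using ih true

lemma canE_last (l : List Char) :
    canE l = [] ∨ ∃ m x, canE l = m ++ [x] ∧ PySem.Chars.isalnum x = true := by
  cases l with
  | nil => exact Or.inl rfl
  | cons c t =>
    by_cases h : PySem.Chars.isalnum c = true
    · rcases canF_last t false with h0 | ⟨m, x, hm, hx⟩
      · exact Or.inr ⟨[], c, by simp [canE, h, h0], h⟩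
      · exact Or.inr ⟨c :: m, x, by simp [canE, h, hm], hx⟩
    · simpa [canE, h] using canE_last t

lemma canE_ne_nil (l : List Char) (h : l.any PySem.Chars.isalnum = true) : canE l ≠ [] := by
  induction l with
  | nil => simp at h
  | cons c t ih =>
    by_cases hc : PySem.Chars.isalnum c = true
    · simp [canE, hc]
    · have : t.any PySem.Chars.isalnum = true := by simpa [hc] using h
      simpa [canE, hc] using ih this

-- the shared boundary-guard tail of both ports is the identity on canE (canE starts and ends alnum)
lemma guards_canE (l : List Char) (h : l.any PySem.Chars.isalnum = true) :
    (let n3 := canE l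
     let n4 :=
       match PySem.List.pyGet? n3 0 with
       | none => n3
       | some c => if !(PySem.Chars.isalnum c) then 'a' :: n3 else n3
     match PySem.List.pyGet? n4 (-1) with
     | none => n4
     | some c => if !(PySem.Chars.isalnum c) then n4 ++ ['a'] else n4) = canE l := by
  rcases canE_cases l with h0 | ⟨c, t, hct, hc⟩
  · exact absurd h0 (canE_ne_nil _ h)
  · rcases canE_last l with h0 | ⟨m, x, hmx, hx⟩
    · exact absurd h0 (canE_ne_nil _ h)
    · dsimp only
      rw [hct]
      simp only [show PySem.List.pyGet? (c :: t) 0 = some c from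
        PySem.List.pyGet?_zero_cons c t, hc]
      simp only [Bool.not_true, Bool.false_eq_true, if_false]
      rw [← hct, hmx]
      simp only [PySem.List.pyGet?_neg_one_append_singleton, hx]
      simp

-- B's fold computes the canonical result
lemma foldB_ne (l : List Char) :
    ∀ acc sep, acc ≠ [] →
      (l.foldl (fun (st : List Char × Bool) c =>
        if PySem.Chars.isalnum c then
          (st.1 ++ (if st.2 then ['-', c] else [c]), false)
        else
          (st.1, st.2 || !st.1.isEmpty)) (acc, sep)).1 = acc ++ canF sep l := by
  induction l with
  | nil => intro acc sep _; simp [canF]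
  | cons c t ih =>
    intro acc sep hacc
    by_cases h : PySem.Chars.isalnum c = true
    · rw [List.foldl_cons]
      simp only [h, if_true]
      rw [ih (acc ++ (if sep then ['-', c] else [c])) false (by by_cases hs : sep <;> simp [hs])]
      by_cases hs : sep <;> simp [canF, h, hs]
    · rw [List.foldl_cons]
      simp only [h, if_false, Bool.false_eq_true]
      rw [ih acc (sep || !acc.isEmpty) hacc]
      have : (sep || !acc.isEmpty) = true := by
        cases acc with
        | nil => exact absurd rfl hacc
        | cons a t' => simp
      rw [this]
      by_cases hs : sep <;> simp [canF, h, hs]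

lemma foldB (l : List Char) :
    (l.foldl (fun (st : List Char × Bool) c =>
      if PySem.Chars.isalnum c then
        (st.1 ++ (if st.2 then ['-', c] else [c]), false)
      else
        (st.1, st.2 || !st.1.isEmpty)) ([], false)).1 = canE l := by
  induction l with
  | nil => rfl
  | cons c t ih =>
    by_cases h : PySem.Chars.isalnum c = true
    · rw [List.foldl_cons]
      simp only [h, if_true]
      rw [show (([] : List Char) ++ (if false = true then ['-', c] else [c]), false)
            = ([c], false) by simp]
      rw [foldB_ne t [c] false (by simp)]
      simp [canE, h]
    · rw [List.foldl_cons]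
      simp only [h, if_false, Bool.false_eq_true]
      simpa [canE, h] using ih

-- A computes the canonical result (under Pre_)
lemma A_result (name : String)
    (h : ((PySem.Str.lower name).toList).any PySem.Chars.isalnum = true) :
    normalize_namespace name = String.ofList (canE ((PySem.Str.lower name).toList)) := by
  unfold normalize_namespace
  dsimp only
  have h3 : PySem.Chars.join ['-']
      ((PySem.Chars.splitOn (PySem.Chars.stripChars
        (PySem.Chars.join [] (((PySem.Str.lower name).toList).map
          (fun c => if PySem.Chars.isalnum c then [c] else ['-']))) ['-'])
        ['-']).filter (fun part => !part.isEmpty)) = canE ((PySem.Str.lower name).toList) := by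
    rw [join_map_phi, splitOn_dash]
    have hF := Flt_split1_strip (((PySem.Str.lower name).toList).map phi)
    unfold Flt at hF
    rw [hF]
    exact ((grand ((PySem.Str.lower name).toList)).1).symm
  rw [h3]
  have := guards_canE ((PySem.Str.lower name).toList) h
  dsimp only at this
  rw [this]

-- B computes the canonical result too (under Pre_)
lemma B_result (name : String)
    (h : ((PySem.Str.lower name).toList).any PySem.Chars.isalnum = true) :
    normalize_namespace_alt name = String.ofList (canE ((PySem.Str.lower name).toList)) := by
  unfold normalize_namespace_alt
  dsimp only
  rw [foldB]
  have := guards_canE ((PySem.Str.lower name).toList) h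
  dsimp only at this
  rw [this]

-- ===== VERDICT (by name: the statement is the Claim_ definition above) =====
theorem normalize_namespace_spec : Claim_equal_normalize_namespace := by
  intro name _ hpre
  unfold Spec_normalize_namespace
  have hl : ((PySem.Str.lower name).toList).any PySem.Chars.isalnum = true := by
    unfold Pre_normalize_namespace at hpre
    simpa [PySem.Chars.lower, List.any_map, Function.comp] using hpre
  rw [A_result name hl, B_result name hl]
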